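-- pv_equiv track=rewrite | github.com/yurimimi/yui | src/yum/imageops.py | _parse_crop_args
-- ===== SOURCE A (Python) =====
-- def _parse_crop_args(crop_args_str: str) -> list[int]:
--     """Parse argument string of crop arguments into a list of args
--     """
--
-- 	# Possibly make different ways: aspect ratio, crop from edges, by
-- 	# percentage, from center, etc.
-- 	# For now it's 'cropping edges'. The edges order is like in CSS --
-- 	# clockwise
--     crop_args_list = crop_args_str.split(",")
--     # @todo Add crop by percent
--     crop_args = [int(num) for num in crop_args_list]
--     # @todo I see here a pattern. Can I do this with a single recursive function?
--     if len(crop_args) == 4: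
--         pass
--     elif len(crop_args) == 3:
--         crop_args.append(crop_args[1])
--     elif len(crop_args) == 2:
--         crop_args.append(crop_args[0])
--         crop_args.append(crop_args[1])
--     elif len(crop_args) == 1:
--         crop_args.append(crop_args[0])
--         crop_args.append(crop_args[0])
--         crop_args.append(crop_args[0])
--     else:
--         # @todo make error message more clear. Like that the user has to provide
--         # from 1 to 4 arguments and it works like in CSS.
--         raise ValueError("Too few or too many params in --crop.")
--
--     return crop_args
-- ===== SOURCE B (Python) =====
-- def _parse_crop_args(crop_args_str: str) -> list[int]:
--     """Parse argument string of crop arguments into a list of args"""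
--     vals = [int(num) for num in crop_args_str.split(",")]
--     table = {1: [0, 0, 0, 0], 2: [0, 1, 0, 1], 3: [0, 1, 2, 1], 4: [0, 1, 2, 3]}
--     if len(vals) not in table:
--         raise ValueError("Too few or too many params in --crop.")
--     return [vals[i] for i in table[len(vals)]]
-- ===== Notes on version B (the rewrite author's own statement) =====
-- stated objective: simpler
-- what changed: Replaces the if-elif chain of sequential appends with a fixed length-to-source-index table and a single index-selection comprehension.
import Mathlib
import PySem

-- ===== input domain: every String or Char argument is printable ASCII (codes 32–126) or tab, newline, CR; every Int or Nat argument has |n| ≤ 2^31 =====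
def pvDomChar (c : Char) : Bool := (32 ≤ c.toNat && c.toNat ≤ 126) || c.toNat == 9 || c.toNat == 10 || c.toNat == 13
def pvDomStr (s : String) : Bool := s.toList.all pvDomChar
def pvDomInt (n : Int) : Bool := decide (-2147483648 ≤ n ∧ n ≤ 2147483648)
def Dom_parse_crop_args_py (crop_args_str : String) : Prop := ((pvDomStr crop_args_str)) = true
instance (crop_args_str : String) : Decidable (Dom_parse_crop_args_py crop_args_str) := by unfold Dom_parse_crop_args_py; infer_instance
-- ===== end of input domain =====

-- B replaces A's if-elif appending chain with a length-indexed table of source indices; objective: simpler, same cost.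
-- ===== PORT A =====
-- Port of A: parse comma-separated ints, then the if-elif appending chain on the length.
def cropExpandA (crop_args : List Int) : List Int :=
  if crop_args.length = 4 then crop_args
  else if crop_args.length = 3 then crop_args ++ [PySem.List.pyGetD crop_args 1 0]
  else if crop_args.length = 2 then
    crop_args ++ [PySem.List.pyGetD crop_args 0 0, PySem.List.pyGetD crop_args 1 0]
  else if crop_args.length = 1 then
    crop_args ++ [PySem.List.pyGetD crop_args 0 0, PySem.List.pyGetD crop_args 0 0,
      PySem.List.pyGetD crop_args 0 0]
  else []  -- ValueError("Too few or too many params in --crop."): excluded by Pre_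

def parse_crop_args_py (crop_args_str : String) : List Int :=
  match (PySem.Chars.splitOn crop_args_str.toList [',']).mapM PySem.Int.ofChars? with
  | none => []  -- ValueError from int(): excluded by Pre_
  | some crop_args => cropExpandA crop_args

-- ===== PORT B =====
-- Port of B: a fixed length-to-source-index table, output built by index selection.
def cropTable : PySem.Dict Int (List Int) :=
  PySem.Dict.ofList [(1, [0, 0, 0, 0]), (2, [0, 1, 0, 1]), (3, [0, 1, 2, 1]), (4, [0, 1, 2, 3])]

def cropExpandB (vals : List Int) : List Int :=
  match PySem.Dict.get? cropTable (vals.length : Int) with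
  | none => []  -- ValueError("Too few or too many params in --crop."): excluded by Pre_
  | some idxs => idxs.map (fun i => PySem.List.pyGetD vals i 0)

def parse_crop_args_py_alt (crop_args_str : String) : List Int :=
  match (PySem.Chars.splitOn crop_args_str.toList [',']).mapM PySem.Int.ofChars? with
  | none => []  -- ValueError from int(): excluded by Pre_
  | some vals => cropExpandB vals

-- ===== PRECONDITION & SPEC =====
-- Python A raises ValueError when a comma-separated segment is not an int literal,
-- or when there are more than 4 segments; exactly those inputs are excluded.
def Pre_parse_crop_args_py (crop_args_str : String) : Prop :=
  (PySem.Chars.splitOn crop_args_str.toList [',']).all (fun t => (PySem.Int.ofChars? t).isSome) = true ∧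
  (PySem.Chars.splitOn crop_args_str.toList [',']).length ≤ 4
instance (crop_args_str : String) : Decidable (Pre_parse_crop_args_py crop_args_str) := by
  unfold Pre_parse_crop_args_py; infer_instance
def pvWitness_parse_crop_args_py : String := "1,2,3"
def Spec_parse_crop_args_py (crop_args_str : String) (out : List Int) : Prop := out = parse_crop_args_py_alt crop_args_str
instance (crop_args_str : String) (out : List Int) : Decidable (Spec_parse_crop_args_py crop_args_str out) := by unfold Spec_parse_crop_args_py; infer_instance

-- ===== CLAIM (what is proved, stated in full; the proofs are below) =====
def Claim_equal_parse_crop_args_py : Prop := ∀ (crop_args_str : String), Dom_parse_crop_args_py crop_args_str → Pre_parse_crop_args_py crop_args_str → Spec_parse_crop_args_py crop_args_str (parse_crop_args_py crop_args_str)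

-- ===== LEMMAS AND PROOFS =====
-- The two expansions agree on every parsed list (also on the lengths Pre_ excludes).
lemma cropExpand_eq (vals : List Int) : cropExpandA vals = cropExpandB vals := by
  match vals with
  | [] => rfl
  | [a] => rfl
  | [a, b] => rfl
  | [a, b, c] => rfl
  | [a, b, c, d] => rfl
  | a :: b :: c :: d :: e :: tl =>
    have h : PySem.Dict.get? cropTable ((tl.length : Int) + 1 + 1 + 1 + 1 + 1) = none := by
      simp [cropTable, PySem.Dict.get?, PySem.Dict.ofList, PySem.Dict.empty,
        PySem.Dict.update, PySem.Dict.insert, PySem.Dict.contains]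
      omega
    simp [cropExpandA, cropExpandB, h]

-- ===== VERDICT (by name: the statement is the Claim_ definition above) =====
theorem parse_crop_args_py_spec : Claim_equal_parse_crop_args_py := by
  intro s _ _
  unfold Spec_parse_crop_args_py parse_crop_args_py parse_crop_args_py_alt
  cases (PySem.Chars.splitOn s.toList [',']).mapM PySem.Int.ofChars? with
  | none => rfl
  | some vals => exact cropExpand_eq vals
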